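-- pv_equiv track=rewrite | github.com/haoge233/new_ymq | little_round.py | get_rounds_from_json
-- ===== SOURCE A (Python) =====
-- def get_rounds_from_json(d_values):
--     rounds = []
--     current_round_start = None
--     previous_frame = None
--
--     for frame, value in d_values.items():
--         if value == 0:  # 识别回合的开始（值为0的帧）
--             if current_round_start is not None:
--                 rounds.append((current_round_start, previous_frame))  # 上一回合结束
--             current_round_start = frame  # 当前回合的起始帧
--         previous_frame = frame  # 更新上一帧为当前帧
--
--     # 添加最后一个回合
--     if current_round_start is not None and previous_frame is not None:
--         rounds.append((current_round_start, previous_frame))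
--
--     return rounds
-- ===== SOURCE B (Python) =====
-- def get_rounds_from_json(d_values):
--     items = list(d_values.items())
--     n = len(items)
--     # advance past the frames before the first round start (first zero value)
--     i = 0
--     while i < n and items[i][1] != 0:
--         i += 1
--     rounds = []
--     while i < n:
--         start_frame = items[i][0]
--         # scan the non-zero span that forms the body of this round
--         j = i + 1
--         while j < n and items[j][1] != 0:
--             j += 1
--         end_frame = items[j - 1][0] if j > i + 1 else start_frame
--         rounds.append((start_frame, end_frame))
--         i = j
--     return rounds
-- ===== Notes on version B (the rewrite author's own statement) =====
-- stated objective: alternative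
-- what changed: Replaces A's single stateful streaming pass (tracking current-round start and previous frame across the whole scan) by a chunking decomposition: drop the prefix before the first zero-valued frame, then repeatedly split off one round (a zero frame plus its following non-zero span) and emit that chunk's endpoints.
import Mathlib
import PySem

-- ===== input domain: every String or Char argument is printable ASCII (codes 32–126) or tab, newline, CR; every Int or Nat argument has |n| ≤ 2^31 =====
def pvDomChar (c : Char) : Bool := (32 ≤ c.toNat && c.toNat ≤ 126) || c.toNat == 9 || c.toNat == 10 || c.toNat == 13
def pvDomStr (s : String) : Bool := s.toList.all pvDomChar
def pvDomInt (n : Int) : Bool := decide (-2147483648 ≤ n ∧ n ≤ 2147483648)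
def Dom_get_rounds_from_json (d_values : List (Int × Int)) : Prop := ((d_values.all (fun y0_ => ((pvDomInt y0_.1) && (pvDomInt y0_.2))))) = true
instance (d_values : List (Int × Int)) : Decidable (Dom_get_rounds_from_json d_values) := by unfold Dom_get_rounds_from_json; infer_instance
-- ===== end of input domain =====

-- B replaces A's stateful streaming scan by a chunking decomposition (drop prefix
-- before the first zero, then split off one round-chunk at a time); same cost, alternative structure.

-- ===== PORT A =====
-- state = (rounds, current_round_start, previous_frame)
def pvStepA (s : List (Int × Int) × Option Int × Option Int) (fv : Int × Int) :
    List (Int × Int) × Option Int × Option Int :=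
  if fv.2 = 0 then
    match s.2.1, s.2.2 with
    | some c, some p => (s.1 ++ [(c, p)], some fv.1, some fv.1)
    | _, _ => (s.1, some fv.1, some fv.1)
  else (s.1, s.2.1, some fv.1)

def get_rounds_from_json (d_values : List (Int × Int)) : List (Int × Int) :=
  let s := d_values.foldl pvStepA ([], none, none)
  match s.2.1, s.2.2 with
  | some c, some p => s.1 ++ [(c, p)]
  | _, _ => s.1

-- ===== PORT B =====
-- Source B walks the items list with index cursors; here each cursor position is the
-- corresponding list suffix.  Inner while-loop (scan j over the non-zero span):
-- returns the span walked over (the round body) and the remaining suffix.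
def pvSpanNZ : List (Int × Int) → List (Int × Int) × List (Int × Int)
  | [] => ([], [])
  | p :: rest =>
    if p.2 ≠ 0 then
      let r := pvSpanNZ rest
      (p :: r.1, r.2)
    else ([], p :: rest)

theorem pvSpanNZ_len : ∀ xs : List (Int × Int), (pvSpanNZ xs).2.length ≤ xs.length := by
  intro xs
  induction xs with
  | nil => simp [pvSpanNZ]
  | cons p rest ih =>
    simp only [pvSpanNZ]
    split
    · exact Nat.le_succ_of_le ih
    · simp

-- Source B's outer while loop: split off one round-chunk at a time
def pvBuild : List (Int × Int) → List (Int × Int)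
  | [] => []
  | p :: rest =>
    let r := pvSpanNZ rest
    (p.1, ((r.1.getLast?).map Prod.fst).getD p.1) :: pvBuild r.2
  termination_by xs => xs.length
  decreasing_by simpa using Nat.lt_succ_of_le (pvSpanNZ_len rest)

def get_rounds_from_json_alt (d_values : List (Int × Int)) : List (Int × Int) :=
  pvBuild (d_values.dropWhile (fun q => q.2 != 0))  -- dropWhile = Source B's first while loop

-- ===== PRECONDITION & SPEC =====
def Spec_get_rounds_from_json (d_values : List (Int × Int)) (out : List (Int × Int)) : Prop := out = get_rounds_from_json_alt d_values
instance (d_values : List (Int × Int)) (out : List (Int × Int)) : Decidable (Spec_get_rounds_from_json d_values out) := by unfold Spec_get_rounds_from_json; infer_instance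

-- ===== CLAIM (what is proved, stated in full; the proofs are below) =====
def Claim_equal_get_rounds_from_json : Prop := ∀ (d_values : List (Int × Int)), Dom_get_rounds_from_json d_values → Spec_get_rounds_from_json d_values (get_rounds_from_json d_values)

-- ===== LEMMAS AND PROOFS =====
-- finishing step of A: flush the open round, if any
def pvFinishA (s : List (Int × Int) × Option Int × Option Int) : List (Int × Int) :=
  match s.2.1, s.2.2 with
  | some c, some p => s.1 ++ [(c, p)]
  | _, _ => s.1

-- A's fold from an "inside a round" state equals the chunk decomposition
theorem pvFoldA_some : ∀ (xs : List (Int × Int)) (rounds : List (Int × Int)) (c p : Int),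
    pvFinishA (xs.foldl pvStepA (rounds, some c, some p)) =
      rounds ++ (c, (((pvSpanNZ xs).1.getLast?).map Prod.fst).getD p) :: pvBuild (pvSpanNZ xs).2 := by
  intro xs
  induction xs with
  | nil => intro rounds c p; simp [pvSpanNZ, pvBuild, pvFinishA]
  | cons q rest ih =>
    intro rounds c p
    by_cases hq : q.2 = 0
    · have hstep : pvStepA (rounds, some c, some p) q = (rounds ++ [(c, p)], some q.1, some q.1) := by
        simp [pvStepA, hq]
      rw [List.foldl_cons, hstep, ih]
      simp [pvSpanNZ, hq, pvBuild]
    · have hstep : pvStepA (rounds, some c, some p) q = (rounds, some c, some q.1) := by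
        simp [pvStepA, hq]
      rw [List.foldl_cons, hstep, ih]
      simp only [pvSpanNZ, if_pos hq]
      cases h : pvSpanNZ rest with
      | mk body rest' =>
        cases body <;> simp [List.getLast?_cons]

-- A's fold from the initial "no round open" state equals B's drop-then-chunk result
theorem pvFoldA_none : ∀ (xs : List (Int × Int)) (p0 : Option Int),
    pvFinishA (xs.foldl pvStepA ([], none, p0)) = pvBuild (xs.dropWhile (fun q => q.2 != 0)) := by
  intro xs
  induction xs with
  | nil => intro p0; simp [pvFinishA, pvBuild]
  | cons q rest ih =>
    intro p0
    by_cases hq : q.2 = 0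
    · have hstep : pvStepA ([], none, p0) q = ([], some q.1, some q.1) := by
        simp [pvStepA, hq]
      rw [List.foldl_cons, hstep, pvFoldA_some]
      simp [List.dropWhile, hq, pvBuild]
    · have hstep : pvStepA ([], none, p0) q = ([], none, some q.1) := by
        simp [pvStepA, hq]
      rw [List.foldl_cons, hstep, ih]
      have hb : (q.2 != 0) = true := by simpa using hq
      simp [List.dropWhile, hb]

-- ===== VERDICT (by name: the statement is the Claim_ definition above) =====
theorem get_rounds_from_json_spec : Claim_equal_get_rounds_from_json := by
  intro d _
  unfold Spec_get_rounds_from_json get_rounds_from_json get_rounds_from_json_alt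
  have := pvFoldA_none d none
  simpa [pvFinishA] using this
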